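-- pv_equiv track=rewrite | github.com/Garhiou/algorithm_and_data_structure | tm_null_eqaul_one.py | tm_null_equal_one
-- ===== SOURCE A (Python) =====
-- def tm_null_equal_one(word: str) -> bool:
--
--     count_0 = 0
--     count_1 = 0
--     for char in word:
--         if char == "0":
--             count_0 += 1
--         elif char == "1":
--             count_1 += 1
--         else:
--             return False
--     return count_0 == count_1
-- ===== SOURCE B (Python) =====
-- def tm_null_equal_one(word: str) -> bool:
--     n = len(word)
--     if n % 2:
--         return False
--     half = n // 2
--     return sorted(word) == ["0"] * half + ["1"] * half
-- ===== Notes on version B (the rewrite author's own statement) =====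
-- stated objective: alternative
-- what changed: Instead of counting with an accumulator loop, B rejects odd lengths and then compares the sorted character list against the canonical multiset pattern ['0']*half + ['1']*half, deciding validity and equal counts by one structural equality.
import Mathlib
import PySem

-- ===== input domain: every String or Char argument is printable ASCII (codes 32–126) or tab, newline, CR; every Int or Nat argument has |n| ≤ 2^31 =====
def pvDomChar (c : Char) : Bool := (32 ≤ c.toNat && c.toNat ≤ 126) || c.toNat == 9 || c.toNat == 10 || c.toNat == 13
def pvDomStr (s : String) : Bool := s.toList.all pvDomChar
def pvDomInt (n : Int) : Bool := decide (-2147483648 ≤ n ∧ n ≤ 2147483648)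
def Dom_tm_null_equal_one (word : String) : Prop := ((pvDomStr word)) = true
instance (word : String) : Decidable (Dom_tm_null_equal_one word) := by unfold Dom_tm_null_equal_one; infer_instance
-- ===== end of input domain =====

-- B replaces A's accumulator counting loop by a multiset test: reject odd
-- lengths, then compare sorted(word) with the canonical pattern
-- ['0']*half + ['1']*half (alternative decomposition, not faster).

-- ===== PORT A =====
-- A's loop: two counters, early 'return False' on any other character.
def tm_null_equal_one_loop : List Char → Int → Int → Bool
  | [], count_0, count_1 => count_0 == count_1
  | c :: rest, count_0, count_1 =>
      if c == '0' then tm_null_equal_one_loop rest (count_0 + 1) count_1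
      else if c == '1' then tm_null_equal_one_loop rest count_0 (count_1 + 1)
      else false

def tm_null_equal_one (word : String) : Bool :=
  tm_null_equal_one_loop word.toList 0 0

-- ===== PORT B =====
-- Source B: n = len(word); if n % 2: return False; half = n // 2;
--       return sorted(word) == ["0"]*half + ["1"]*half
def tm_null_equal_one_alt (word : String) : Bool :=
  let n := word.toList.length
  if n % 2 ≠ 0 then false
  else
    let half := n / 2
    PySem.List.sorted word.toList (fun c => c) false ==
      List.replicate half '0' ++ List.replicate half '1'

-- ===== PRECONDITION & SPEC =====
def Spec_tm_null_equal_one (word : String) (out : Bool) : Prop := out = tm_null_equal_one_alt word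
instance (word : String) (out : Bool) : Decidable (Spec_tm_null_equal_one word out) := by unfold Spec_tm_null_equal_one; infer_instance

-- ===== CLAIM (what is proved, stated in full; the proofs are below) =====
def Claim_equal_tm_null_equal_one : Prop := ∀ (word : String), Dom_tm_null_equal_one word → Spec_tm_null_equal_one word (tm_null_equal_one word)

-- ===== LEMMAS AND PROOFS =====
-- Loop invariant: A's loop with counters c0, c1 answers "all characters are
-- 0/1 and c0 + (#'0') = c1 + (#'1')".
theorem tm_loop_char (l : List Char) : ∀ (c0 c1 : Int),
    tm_null_equal_one_loop l c0 c1 =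
      (l.all (fun c => c == '0' || c == '1') &&
        decide (c0 + (l.count '0' : Int) = c1 + (l.count '1' : Int))) := by
  induction l with
  | nil =>
    intro c0 c1
    simp only [tm_null_equal_one_loop, List.all_nil, List.count_nil,
      Int.natCast_zero, add_zero, Bool.true_and]
    cases h : c0 == c1 <;> simp_all
  | cons c rest ih =>
    intro c0 c1
    by_cases h0 : c = '0'
    · subst h0
      simp [tm_null_equal_one_loop, ih]
      congr 1
      simp only [decide_eq_decide]
      omega
    · by_cases h1 : c = '1'
      · subst h1
        simp [tm_null_equal_one_loop, ih]
        congr 1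
        simp only [decide_eq_decide]
        omega
      · simp [tm_null_equal_one_loop, h0, h1]

-- An all-0/1 list is a permutation of its canonical form.
theorem tm_perm_canon (l : List Char)
    (hv : l.all (fun c => c == '0' || c == '1') = true) :
    l.Perm (List.replicate (l.count '0') '0' ++ List.replicate (l.count '1') '1') := by
  induction l with
  | nil => simp
  | cons c rest ih =>
    simp only [List.all_cons, Bool.and_eq_true, Bool.or_eq_true, beq_iff_eq] at hv
    have ihp := ih (by simpa [List.all_eq_true] using hv.2)
    rcases hv.1 with h | h
    all_goals subst h
    · rw [List.count_cons_self, List.count_cons_of_ne (by decide)]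
      simpa [List.replicate_succ] using ihp.cons '0'
    · rw [List.count_cons_self, List.count_cons_of_ne (by decide)]
      exact (ihp.cons '1').trans List.perm_middle.symm

-- The canonical pattern is weakly increasing.
theorem tm_canon_pairwise (a b : Nat) :
    (List.replicate a '0' ++ List.replicate b '1').Pairwise (· ≤ ·) := by
  apply List.pairwise_append.2
  refine ⟨List.pairwise_replicate.2 (Or.inr le_rfl),
          List.pairwise_replicate.2 (Or.inr le_rfl), ?_⟩
  intro x hx y hy
  rw [List.eq_of_mem_replicate hx, List.eq_of_mem_replicate hy]
  decide

-- ===== VERDICT (by name: the statement is the Claim_ definition above) =====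
theorem tm_null_equal_one_spec : Claim_equal_tm_null_equal_one := by
  intro word _
  unfold Spec_tm_null_equal_one tm_null_equal_one tm_null_equal_one_alt
  rw [tm_loop_char]
  set l := word.toList with hl
  by_cases hv : l.all (fun c => c == '0' || c == '1') = true
  · -- every character is 0 or 1
    have hperm := tm_perm_canon l hv
    have hlen : l.length = l.count '0' + l.count '1' := by
      simpa using hperm.length_eq
    by_cases hc : l.count '0' = l.count '1'
    · -- equal counts: both sides true
      have heven : l.length % 2 = 0 := by omega
      have hhalf : l.length / 2 = l.count '0' := by omega
      have hs : PySem.List.sorted l (fun c => c) false =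
          List.replicate (l.count '0') '0' ++ List.replicate (l.count '1') '1' :=
        PySem.List.sorted_id_eq_of_perm_of_pairwise _ _ hperm.symm
          (tm_canon_pairwise _ _)
      simp [hv, hc, heven, hhalf, hs]
    · -- unequal counts: A is false; B's pattern comparison must fail
      have hA : decide ((0:Int) + (l.count '0' : Int) = 0 + (l.count '1' : Int)) = false := by
        simp; omega
      rw [hv, hA, Bool.and_false]
      by_cases he : l.length % 2 ≠ 0
      · simp [he]
      · rw [if_neg (by simpa using he)]
        symm
        rw [beq_eq_false_iff_ne]
        intro hs
        have hp : l.Perm (List.replicate (l.length / 2) '0' ++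
            List.replicate (l.length / 2) '1') :=
          (PySem.List.sorted_perm l (fun c => c) false).symm.trans (hs ▸ List.Perm.refl _)
        have h0 := hp.count_eq '0'
        have h1 := hp.count_eq '1'
        simp [List.count_replicate] at h0 h1
        omega
  · -- an invalid character exists: A is false, and it also breaks B's pattern
    rw [Bool.eq_false_iff.2 hv, Bool.false_and]
    have hex : ∃ x ∈ l, ¬((x == '0' || x == '1') = true) := by
      simpa [List.all_eq_true] using hv
    rcases hex with ⟨x, hx, hxbad⟩
    by_cases he : l.length % 2 ≠ 0
    · simp [he]
    · rw [if_neg (by simpa using he)]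
      symm
      rw [beq_eq_false_iff_ne]
      intro hs
      have hxs : x ∈ PySem.List.sorted l (fun c => c) false :=
        (PySem.List.mem_sorted _ _ _ _).2 hx
      rw [hs] at hxs
      rcases List.mem_append.1 hxs with h | h <;>
        exact hxbad (by simp [List.eq_of_mem_replicate h])
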